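-- pv_equiv track=rewrite | github.com/carlygaejepsen/Kids-Over-Profits | Scripts/formatted_jobs.py | build_job
-- ===== SOURCE A (Python) =====
-- def clean(s: str) -> str:
--     return (s or "").strip()
--
-- def build_job(role: str, facility: str, dates: str) -> str:
--     role, facility, dates = clean(role), clean(facility), clean(dates)
--     if role and facility and dates:
--         return f"{role} at {facility} {dates}"
--     if role and facility:
--         return f"{role} at {facility}"
--     if facility and dates:
--         return f"{facility} {dates}"
--     return " ".join(x for x in (role, facility, dates) if x)
-- ===== SOURCE B (Python) =====
-- def build_job(role: str, facility: str, dates: str) -> str: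
--     role, facility, dates = role.strip(), facility.strip(), dates.strip()
--     parts = []
--     if role and facility:
--         parts.append(f"{role} at {facility}")
--     else:
--         if role:
--             parts.append(role)
--         if facility:
--             parts.append(facility)
--     if dates:
--         parts.append(dates)
--     return " ".join(parts)
-- ===== Notes on version B (the rewrite author's own statement) =====
-- stated objective: simpler
-- what changed: Replaces A's four-way combinatorial case enumeration (plus a join fallback) with a single incremental assembly: decide the 'at' connector once, collect the present pieces into a list, and ' '.join it.
import Mathlib
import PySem

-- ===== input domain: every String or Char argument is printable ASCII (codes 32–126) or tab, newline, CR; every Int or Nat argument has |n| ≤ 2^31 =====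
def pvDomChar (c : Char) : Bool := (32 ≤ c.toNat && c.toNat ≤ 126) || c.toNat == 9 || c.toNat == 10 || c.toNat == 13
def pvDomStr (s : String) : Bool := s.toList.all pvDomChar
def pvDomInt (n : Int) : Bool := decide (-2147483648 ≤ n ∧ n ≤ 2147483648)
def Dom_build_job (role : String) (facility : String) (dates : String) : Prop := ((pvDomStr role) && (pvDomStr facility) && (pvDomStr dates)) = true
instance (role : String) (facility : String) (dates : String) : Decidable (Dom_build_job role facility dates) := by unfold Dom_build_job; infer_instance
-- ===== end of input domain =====

-- B replaces A's four-way case enumeration by one incremental parts-list assembly; objective: simpler.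

-- ===== PORT A =====
-- clean(s) = (s or "").strip()
def pvCleanA (s : List Char) : List Char := PySem.Chars.strip (if s = [] then [] else s)

def build_job (role : String) (facility : String) (dates : String) : String :=
  let r := pvCleanA role.toList
  let f := pvCleanA facility.toList
  let d := pvCleanA dates.toList
  if r ≠ [] ∧ f ≠ [] ∧ d ≠ [] then
    String.ofList (r ++ [' ', 'a', 't', ' '] ++ f ++ [' '] ++ d)
  else if r ≠ [] ∧ f ≠ [] then
    String.ofList (r ++ [' ', 'a', 't', ' '] ++ f)
  else if f ≠ [] ∧ d ≠ [] then
    String.ofList (f ++ [' '] ++ d)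
  else
    String.ofList (PySem.Chars.join [' '] ([r, f, d].filter (fun x => x ≠ [])))

-- ===== PORT B =====
def build_job_alt (role : String) (facility : String) (dates : String) : String :=
  let r := PySem.Chars.strip role.toList
  let f := PySem.Chars.strip facility.toList
  let d := PySem.Chars.strip dates.toList
  let parts : List (List Char) :=
    (if r ≠ [] ∧ f ≠ [] then [r ++ [' ', 'a', 't', ' '] ++ f]
     else (if r ≠ [] then [r] else []) ++ (if f ≠ [] then [f] else []))
    ++ (if d ≠ [] then [d] else [])
  String.ofList (PySem.Chars.join [' '] parts)

-- ===== PRECONDITION & SPEC =====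
def Spec_build_job (role : String) (facility : String) (dates : String) (out : String) : Prop := out = build_job_alt role facility dates
instance (role : String) (facility : String) (dates : String) (out : String) : Decidable (Spec_build_job role facility dates out) := by unfold Spec_build_job; infer_instance

-- ===== CLAIM (what is proved, stated in full; the proofs are below) =====
def Claim_equal_build_job : Prop := ∀ (role : String) (facility : String) (dates : String), Dom_build_job role facility dates → Spec_build_job role facility dates (build_job role facility dates)

-- ===== LEMMAS AND PROOFS =====
theorem pvCleanA_eq_strip (s : List Char) : pvCleanA s = PySem.Chars.strip s := by
  unfold pvCleanA
  split_ifs with h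
  · simp [h]
  · rfl

-- ===== VERDICT (by name: the statement is the Claim_ definition above) =====
theorem build_job_spec : Claim_equal_build_job := by
  intro role facility dates _
  show build_job role facility dates = build_job_alt role facility dates
  unfold build_job build_job_alt
  rw [pvCleanA_eq_strip, pvCleanA_eq_strip, pvCleanA_eq_strip]
  generalize PySem.Chars.strip role.toList = r
  generalize PySem.Chars.strip facility.toList = f
  generalize PySem.Chars.strip dates.toList = d
  rcases eq_or_ne r [] with hr | hr <;> rcases eq_or_ne f [] with hf | hf <;>
    rcases eq_or_ne d [] with hd | hd <;>
    simp [hr, hf, hd, PySem.Chars.join_nil, PySem.Chars.join_singleton,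
      PySem.Chars.join_cons_cons, List.append_assoc]
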